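-- pv_equiv track=rewrite | github.com/Viet281101/ITLMAU | Semestre_5_L3/Intro_à_la_sécurité/TP/TP3/tp3.py | select_candidates
-- ===== SOURCE A (Python) =====
-- def select_candidates(pairs, mask_i, mask_o) -> list:
--     candidates : list = []
--
--     for candidate_k0 in range(256):
--         score = 0
--
--         for message, cipher_text in pairs:
--             t = (message ^ candidate_k0) & mask_i  # Appliquer masque_i et XOR avec k0
--             c_prime = (cipher_text ^ candidate_k0) & mask_o  # Appliquer masque_o et XOR avec k0
--
--             if bin(t).count('1') % 2 == bin(c_prime).count('1') % 2:
--                 score += 1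
--
--         if not candidates or score == candidates[0][0]:
--             candidates.append((score, candidate_k0))
--         elif score > candidates[0][0]:
--             candidates = [(score, candidate_k0)]
--
--     return candidates
-- ===== SOURCE B (Python) =====
-- def select_candidates(pairs, mask_i, mask_o) -> list:
--     # Linear-cryptanalysis shortcut: parity((m^k)&mi) == parity((c^k)&mo)
--     # iff parity(m&mi)^parity(c&mo) == parity(k&(mi^mo)) (valid for nonnegative
--     # masks), so one pass over pairs suffices.
--     even = 0
--     odd = 0
--     for message, cipher_text in pairs:
--         if (bin(message & mask_i).count('1') + bin(cipher_text & mask_o).count('1')) % 2 == 0: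
--             even += 1
--         else:
--             odd += 1
--     xm = mask_i ^ mask_o
--     best = -1
--     out = []
--     for k0 in range(256):
--         score = even if bin(k0 & xm).count('1') % 2 == 0 else odd
--         if score > best:
--             best = score
--             out = [(score, k0)]
--         elif score == best:
--             out.append((score, k0))
--     return out
-- ===== Notes on version B (the rewrite author's own statement) =====
-- stated objective: faster
-- what changed: Instead of recomputing each pair's parities for every one of the 256 candidate keys, B uses XOR-linearity of parity (valid for nonnegative masks) to classify each pair once by parity(m&mask_i)^parity(c&mask_o) in a single pass, so each key's score is just the precomputed even- or odd-class count selected by parity(k0&(mask_i^mask_o)).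
-- outside the precondition, e.g. on select_candidates([(-10, -31), (25, -6), (-35, 3), (20, -25)], -33, -2): A returns [(4, 86)]
import Mathlib
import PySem

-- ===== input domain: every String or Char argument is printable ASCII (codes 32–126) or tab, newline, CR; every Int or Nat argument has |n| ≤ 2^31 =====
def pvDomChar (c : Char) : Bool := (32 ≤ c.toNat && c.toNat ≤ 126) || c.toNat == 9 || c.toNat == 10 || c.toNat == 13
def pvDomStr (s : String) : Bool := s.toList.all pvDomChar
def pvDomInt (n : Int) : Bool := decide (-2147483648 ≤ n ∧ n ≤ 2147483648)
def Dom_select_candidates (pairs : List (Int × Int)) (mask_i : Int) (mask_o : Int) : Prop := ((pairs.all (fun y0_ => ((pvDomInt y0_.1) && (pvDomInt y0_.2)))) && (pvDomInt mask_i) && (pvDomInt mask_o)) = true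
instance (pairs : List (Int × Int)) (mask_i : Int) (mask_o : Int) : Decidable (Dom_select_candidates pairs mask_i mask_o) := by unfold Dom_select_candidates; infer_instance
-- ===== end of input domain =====

-- B replaces A's 256×N rescoring loop by one parity-classifying pass over the pairs
-- (XOR-linearity of parity), O(N+256) instead of O(256·N); equivalence is claimed for
-- nonnegative masks (the natural bitmask domain).

-- ===== PORT A =====
-- bin(t).count('1') = popcount of |t| = PySem.Int.bitCount t (exact, also for negatives)
def select_candidates (pairs : List (Int × Int)) (mask_i : Int) (mask_o : Int) : List (Int × Int) :=
  (PySem.List.pyRange 0 256).foldl (fun candidates candidate_k0 =>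
    let score : Int := pairs.foldl (fun score mc =>
      let t := PySem.Int.band (PySem.Int.bxor mc.1 candidate_k0) mask_i
      let c_prime := PySem.Int.band (PySem.Int.bxor mc.2 candidate_k0) mask_o
      if PySem.Int.bitCount t % 2 = PySem.Int.bitCount c_prime % 2 then score + 1 else score) 0
    if candidates = [] ∨ score = (candidates.headD (0, 0)).1 then
      candidates ++ [(score, candidate_k0)]
    else if score > (candidates.headD (0, 0)).1 then
      [(score, candidate_k0)]
    else candidates) []

-- ===== PORT B =====
def select_candidates_alt (pairs : List (Int × Int)) (mask_i : Int) (mask_o : Int) : List (Int × Int) :=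
  let eo : Int × Int := pairs.foldl (fun eo mc =>
    if (PySem.Int.bitCount (PySem.Int.band mc.1 mask_i)
        + PySem.Int.bitCount (PySem.Int.band mc.2 mask_o)) % 2 = 0
    then (eo.1 + 1, eo.2) else (eo.1, eo.2 + 1)) (0, 0)
  let xm := PySem.Int.bxor mask_i mask_o
  ((PySem.List.pyRange 0 256).foldl (fun st k0 =>
    let score : Int := if PySem.Int.bitCount (PySem.Int.band k0 xm) % 2 = 0 then eo.1 else eo.2
    if score > st.1 then (score, [(score, k0)])
    else if score = st.1 then (st.1, st.2 ++ [(score, k0)])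
    else st) ((-1 : Int), ([] : List (Int × Int)))).2

-- ===== PRECONDITION & SPEC =====
-- Pre_ restricts to nonnegative masks (the natural bitmask domain of linear cryptanalysis);
-- A also returns on negative masks, where the parity of Python's sign-magnitude bin() of
-- negative ints is an implementation artefact B does not match.
def Pre_select_candidates (pairs : List (Int × Int)) (mask_i : Int) (mask_o : Int) : Prop :=
  0 ≤ mask_i ∧ 0 ≤ mask_o
instance (pairs : List (Int × Int)) (mask_i : Int) (mask_o : Int) : Decidable (Pre_select_candidates pairs mask_i mask_o) := by unfold Pre_select_candidates; infer_instance

def pvWitness_select_candidates : (List (Int × Int)) × Int × Int := ([(1, 2), (250, 7)], 3, 5)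

def Spec_select_candidates (pairs : List (Int × Int)) (mask_i : Int) (mask_o : Int) (out : List (Int × Int)) : Prop := out = select_candidates_alt pairs mask_i mask_o
instance (pairs : List (Int × Int)) (mask_i : Int) (mask_o : Int) (out : List (Int × Int)) : Decidable (Spec_select_candidates pairs mask_i mask_o out) := by unfold Spec_select_candidates; infer_instance

-- ===== CLAIM (what is proved, stated in full; the proofs are below) =====
def Claim_equal_select_candidates : Prop := ∀ (pairs : List (Int × Int)) (mask_i : Int) (mask_o : Int), Dom_select_candidates pairs mask_i mask_o → Pre_select_candidates pairs mask_i mask_o → Spec_select_candidates pairs mask_i mask_o (select_candidates pairs mask_i mask_o)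

-- ===== LEMMAS AND PROOFS =====

-- bitCount halving recursion, total on Nat
theorem pv_bc_step (m : Nat) :
    PySem.Int.bitCount (m : Int) = m % 2 + PySem.Int.bitCount ((m / 2 : Nat) : Int) := by
  rcases Nat.eq_zero_or_pos m with h | h
  · subst h; decide
  · exact PySem.Int.bitCount_natCast h

-- parity of popcount is XOR-linear on Nat
theorem pv_bc_xor (x y : Nat) :
    PySem.Int.bitCount ((x ^^^ y : Nat) : Int) % 2
      = (PySem.Int.bitCount (x : Int) + PySem.Int.bitCount (y : Int)) % 2 := by
  induction hn : x + y using Nat.strong_induction_on generalizing x y with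
  | _ n ih =>
    rcases Nat.eq_zero_or_pos n with h0 | h0
    · subst hn; have hx : x = 0 := by omega
      have hy : y = 0 := by omega
      subst hx; subst hy; decide
    · have hdiv : x / 2 + y / 2 < n := by omega
      have hrec := ih (x / 2 + y / 2) hdiv (x / 2) (y / 2) rfl
      have hx2 : (x ^^^ y) / 2 = x / 2 ^^^ y / 2 := Nat.xor_div_two
      have hm2 : (x ^^^ y) % 2 = (x % 2 + y % 2) % 2 := by
        rcases Nat.mod_two_eq_zero_or_one x with h | h <;>
          rcases Nat.mod_two_eq_zero_or_one y with g | g <;> simp [h, g] <;> omega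
      rw [pv_bc_step (x ^^^ y), pv_bc_step x, pv_bc_step y, hx2]
      omega

theorem pv_and_mod_two (a b : Nat) : (a &&& b) % 2 = a % 2 &&& b % 2 := by
  rw [← Nat.and_one_is_mod, ← Nat.and_one_is_mod a, ← Nat.and_one_is_mod b]
  calc a &&& b &&& 1 = a &&& (b &&& 1) := Nat.and_assoc _ _ _
    _ = a &&& ((b &&& 1) &&& 1) := by rw [Nat.and_assoc, Nat.and_self]
    _ = a &&& (1 &&& (b &&& 1)) := by rw [Nat.and_comm (b &&& 1) 1]
    _ = (a &&& 1) &&& (b &&& 1) := by rw [← Nat.and_assoc]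

theorem pv_sub_and (I X : Nat) :
    PySem.Int.bitCount ((I - (I &&& X) : Nat) : Int) % 2
      = (PySem.Int.bitCount (I : Int) + PySem.Int.bitCount ((I &&& X : Nat) : Int)) % 2 := by
  induction I using Nat.strong_induction_on generalizing X with
  | _ I ih =>
    rcases Nat.eq_zero_or_pos I with h0 | h0
    · subst h0; simp
    · have hY2 : (I &&& X) % 2 = I % 2 &&& X % 2 := pv_and_mod_two I X
      have hle1 : (I &&& X) % 2 ≤ I % 2 := by rw [hY2]; exact Nat.and_le_left
      have hYd : (I &&& X) / 2 = I / 2 &&& X / 2 := Nat.and_div_two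
      have hle2 : I / 2 &&& X / 2 ≤ I / 2 := Nat.and_le_left
      have hm : (I - (I &&& X)) % 2 = I % 2 - (I &&& X) % 2 := by omega
      have hd : (I - (I &&& X)) / 2 = I / 2 - (I / 2 &&& X / 2) := by omega
      have e1 := pv_bc_step (I - (I &&& X))
      rw [hm, hd] at e1
      have e2 := pv_bc_step I
      have e3 := pv_bc_step (I &&& X)
      rw [hYd] at e3
      have ih2 := ih (I / 2) (by omega) (X / 2)
      omega

theorem pv_band_bxor_parity (m k mi : Int) (hk : 0 ≤ k) (hmi : 0 ≤ mi) :
    PySem.Int.bitCount (PySem.Int.band (PySem.Int.bxor m k) mi) % 2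
      = (PySem.Int.bitCount (PySem.Int.band m mi)
          + PySem.Int.bitCount (PySem.Int.band k mi)) % 2 := by
  by_cases hm : 0 ≤ m
  · rw [PySem.Int.bxor_of_nonneg hm hk,
        PySem.Int.band_of_nonneg (Int.natCast_nonneg _) hmi,
        PySem.Int.band_of_nonneg hm hmi, PySem.Int.band_of_nonneg hk hmi,
        Int.toNat_natCast, Nat.and_xor_distrib_right]
    exact pv_bc_xor _ _
  · have hmneg : m < 0 := by omega
    have hxneg : PySem.Int.bxor m k = -((((-m - 1).toNat ^^^ k.toNat : Nat)) : Int) - 1 := by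
      simp only [PySem.Int.bxor, if_neg hm, if_pos hk]
    have hbneg : ¬ (0 ≤ PySem.Int.bxor m k) := by
      rw [hxneg]; have := Int.natCast_nonneg (((-m - 1).toNat ^^^ k.toNat : Nat)); omega
    have harg : (-(-(((-m - 1).toNat ^^^ k.toNat : Nat) : Int) - 1) - 1)
        = (((-m - 1).toNat ^^^ k.toNat : Nat) : Int) := by ring
    have h1 : PySem.Int.band (PySem.Int.bxor m k) mi
        = ((mi.toNat - (mi.toNat &&& ((-m - 1).toNat ^^^ k.toNat)) : Nat) : Int) := by
      rw [hxneg]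
      simp only [PySem.Int.band]
      rw [if_neg (by rw [← hxneg]; exact hbneg), if_pos hmi, harg, Int.toNat_natCast]
    have h2 : PySem.Int.band m mi
        = ((mi.toNat - (mi.toNat &&& (-m - 1).toNat) : Nat) : Int) := by
      simp only [PySem.Int.band, if_neg hm, if_pos hmi]
    have h3 : PySem.Int.band k mi = ((k.toNat &&& mi.toNat : Nat) : Int) := by
      rw [PySem.Int.band_of_nonneg hk hmi]
    rw [h1, h2, h3]
    have s1 := pv_sub_and mi.toNat ((-m - 1).toNat ^^^ k.toNat)
    have s2 := pv_sub_and mi.toNat (-m - 1).toNat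
    have x1' : PySem.Int.bitCount ((mi.toNat &&& ((-m - 1).toNat ^^^ k.toNat) : Nat) : Int)
        = PySem.Int.bitCount ((((mi.toNat &&& (-m - 1).toNat) ^^^ (mi.toNat &&& k.toNat) : Nat)) : Int) := by
      rw [Nat.and_xor_distrib_left]
    have x2 := pv_bc_xor (mi.toNat &&& (-m - 1).toNat) (mi.toNat &&& k.toNat)
    have hc' : PySem.Int.bitCount ((k.toNat &&& mi.toNat : Nat) : Int)
        = PySem.Int.bitCount ((mi.toNat &&& k.toNat : Nat) : Int) := by
      rw [Nat.and_comm]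
    omega

-- the per-pair condition of A, rewritten through parity linearity (nonnegative masks)
theorem pv_cond (m c k mi mo : Int) (hk : 0 ≤ k) (hmi : 0 ≤ mi) (hmo : 0 ≤ mo) :
    (PySem.Int.bitCount (PySem.Int.band (PySem.Int.bxor m k) mi) % 2
       = PySem.Int.bitCount (PySem.Int.band (PySem.Int.bxor c k) mo) % 2)
    ↔ ((PySem.Int.bitCount (PySem.Int.band m mi)
          + PySem.Int.bitCount (PySem.Int.band c mo)) % 2
        = PySem.Int.bitCount (PySem.Int.band k (PySem.Int.bxor mi mo)) % 2) := by
  have h1 := pv_band_bxor_parity m k mi hk hmi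
  have h2 := pv_band_bxor_parity c k mo hk hmo
  have h3 : PySem.Int.bitCount (PySem.Int.band k (PySem.Int.bxor mi mo)) % 2
      = (PySem.Int.bitCount (PySem.Int.band k mi)
          + PySem.Int.bitCount (PySem.Int.band k mo)) % 2 := by
    rw [PySem.Int.bxor_of_nonneg hmi hmo,
        PySem.Int.band_of_nonneg hk (Int.natCast_nonneg _),
        PySem.Int.band_of_nonneg hk hmi, PySem.Int.band_of_nonneg hk hmo,
        Int.toNat_natCast, Nat.and_xor_distrib_left]
    exact pv_bc_xor _ _
  omega

-- the even/odd classifying pass of B computes the two countP's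
theorem pv_eo_fold (L : List (Int × Int)) (q : (Int × Int) → Prop) [DecidablePred q]
    (a b : Int) :
    L.foldl (fun eo mc => if q mc then (eo.1 + 1, eo.2) else (eo.1, eo.2 + 1)) (a, b)
      = (a + (L.countP (fun mc => decide (q mc)) : Int),
         b + (L.countP (fun mc => !decide (q mc)) : Int)) := by
  induction L generalizing a b with
  | nil => simp
  | cons hd tl ih =>
    by_cases h : q hd <;> simp [h, ih] <;> omega

-- alignment of the two selection loops: A keeps the best-so-far score at the head of its
-- candidate list, B keeps it separately
theorem pv_sel_align (f : Int → Int) (ks : List Int) :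
    ∀ (cand : List (Int × Int)) (best : Int), cand ≠ [] → best = (cand.headD (0, 0)).1 →
    ks.foldl (fun candidates k =>
        if candidates = [] ∨ f k = (candidates.headD (0, 0)).1 then candidates ++ [(f k, k)]
        else if f k > (candidates.headD (0, 0)).1 then [(f k, k)] else candidates) cand
      = (ks.foldl (fun st k =>
          if f k > st.1 then (f k, [(f k, k)])
          else if f k = st.1 then (st.1, st.2 ++ [(f k, k)]) else st) (best, cand)).2 := by
  induction ks with
  | nil => intro cand best _ _; rfl
  | cons k tl ih =>
    intro cand best hne hb
    rcases cand with _ | ⟨h, t⟩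
    · exact absurd rfl hne
    simp only [List.foldl_cons, List.headD_cons] at hb ⊢
    subst hb
    by_cases heq : f k = h.1
    · have c2 : ¬ f k > h.1 := by omega
      rw [if_pos (Or.inr heq : h :: t = [] ∨ f k = h.1), if_neg c2, if_pos heq]
      exact ih ((h :: t) ++ [(f k, k)]) h.1 (by simp) (by simp)
    · have c1 : ¬ (h :: t = [] ∨ f k = h.1) := by simp [heq]
      by_cases hgt : f k > h.1
      · rw [if_neg c1, if_pos hgt, if_pos hgt]
        exact ih [(f k, k)] (f k) (by simp) (by simp)
      · rw [if_neg c1, if_neg hgt, if_neg hgt, if_neg heq]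
        exact ih (h :: t) h.1 (by simp) (by simp)

-- the two selection loops over range(256) agree for any score function with 0 ≤ f 0
theorem pv_outer (f : Int → Int) (h0 : 0 ≤ f 0) :
    (PySem.List.pyRange 0 256).foldl (fun candidates k =>
        if candidates = [] ∨ f k = (candidates.headD (0, 0)).1 then candidates ++ [(f k, k)]
        else if f k > (candidates.headD (0, 0)).1 then [(f k, k)] else candidates) []
      = ((PySem.List.pyRange 0 256).foldl (fun st k =>
          if f k > st.1 then (f k, [(f k, k)])
          else if f k = st.1 then (st.1, st.2 ++ [(f k, k)]) else st)
          ((-1 : Int), ([] : List (Int × Int)))).2 := by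
  rw [PySem.List.pyRange_one_cons (by norm_num : (0 : Int) < 256)]
  rw [List.foldl_cons, List.foldl_cons]
  dsimp only
  rw [if_pos (Or.inl rfl), if_pos (show f 0 > -1 by omega)]
  simp only [List.nil_append]
  exact pv_sel_align f _ [(f 0, 0)] (f 0) (by simp) (by simp)


-- A's inner scoring loop counts the pairs satisfying its parity test
theorem pv_countA (mask_i mask_o k : Int) (L : List (Int × Int)) :
    ∀ a : Int, L.foldl (fun score mc =>
        if PySem.Int.bitCount (PySem.Int.band (PySem.Int.bxor mc.1 k) mask_i) % 2
             = PySem.Int.bitCount (PySem.Int.band (PySem.Int.bxor mc.2 k) mask_o) % 2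
        then score + 1 else score) a
      = a + (L.countP (fun mc => decide
          (PySem.Int.bitCount (PySem.Int.band (PySem.Int.bxor mc.1 k) mask_i) % 2
             = PySem.Int.bitCount (PySem.Int.band (PySem.Int.bxor mc.2 k) mask_o) % 2)) : Int) := by
  induction L with
  | nil => simp
  | cons hd tl ih =>
    intro a
    by_cases h : PySem.Int.bitCount (PySem.Int.band (PySem.Int.bxor hd.1 k) mask_i) % 2
        = PySem.Int.bitCount (PySem.Int.band (PySem.Int.bxor hd.2 k) mask_o) % 2
    · simp [h, ih]
      ring
    · simp only [List.foldl_cons, if_neg h, ih, List.countP_cons]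
      simp [h]

-- A's inner scoring loop equals B's table lookup, for any nonnegative key
theorem pv_score (pairs : List (Int × Int)) (mask_i mask_o k : Int)
    (hmi : 0 ≤ mask_i) (hmo : 0 ≤ mask_o) (hk : 0 ≤ k) :
    pairs.foldl (fun score mc =>
        if PySem.Int.bitCount (PySem.Int.band (PySem.Int.bxor mc.1 k) mask_i) % 2
             = PySem.Int.bitCount (PySem.Int.band (PySem.Int.bxor mc.2 k) mask_o) % 2
        then score + 1 else score) 0
      = (if PySem.Int.bitCount (PySem.Int.band k (PySem.Int.bxor mask_i mask_o)) % 2 = 0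
         then (pairs.countP (fun mc => decide
                ((PySem.Int.bitCount (PySem.Int.band mc.1 mask_i)
                  + PySem.Int.bitCount (PySem.Int.band mc.2 mask_o)) % 2 = 0)) : Int)
         else (pairs.countP (fun mc => !decide
                ((PySem.Int.bitCount (PySem.Int.band mc.1 mask_i)
                  + PySem.Int.bitCount (PySem.Int.band mc.2 mask_o)) % 2 = 0)) : Int)) := by
  rw [pv_countA mask_i mask_o k pairs 0]
  rcases Nat.mod_two_eq_zero_or_one
      (PySem.Int.bitCount (PySem.Int.band k (PySem.Int.bxor mask_i mask_o))) with hb | hb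
  · rw [if_pos hb, List.countP_congr
      (p := fun (mc : Int × Int) => decide
        (PySem.Int.bitCount (PySem.Int.band (PySem.Int.bxor mc.1 k) mask_i) % 2
           = PySem.Int.bitCount (PySem.Int.band (PySem.Int.bxor mc.2 k) mask_o) % 2))
      (q := fun (mc : Int × Int) => decide ((PySem.Int.bitCount (PySem.Int.band mc.1 mask_i)
           + PySem.Int.bitCount (PySem.Int.band mc.2 mask_o)) % 2 = 0))
      (fun mc _hmc => by
        simp only [decide_eq_true_eq]
        rw [pv_cond mc.1 mc.2 k mask_i mask_o hk hmi hmo, hb])]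
    omega
  · rw [if_neg (by omega), List.countP_congr
      (p := fun (mc : Int × Int) => decide
        (PySem.Int.bitCount (PySem.Int.band (PySem.Int.bxor mc.1 k) mask_i) % 2
           = PySem.Int.bitCount (PySem.Int.band (PySem.Int.bxor mc.2 k) mask_o) % 2))
      (q := fun (mc : Int × Int) => !decide ((PySem.Int.bitCount (PySem.Int.band mc.1 mask_i)
           + PySem.Int.bitCount (PySem.Int.band mc.2 mask_o)) % 2 = 0))
      (fun mc _hmc => by
        simp only [decide_eq_true_eq, Bool.not_eq_true', decide_eq_false_iff_not]
        rw [pv_cond mc.1 mc.2 k mask_i mask_o hk hmi hmo, hb]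
        omega)]
    omega

-- ===== VERDICT (by name: the statement is the Claim_ definition above) =====
theorem select_candidates_spec : Claim_equal_select_candidates := by
  intro pairs mask_i mask_o _dom pre
  obtain ⟨hmi, hmo⟩ := pre
  unfold Spec_select_candidates select_candidates select_candidates_alt
  simp only []
  rw [pv_eo_fold pairs (fun mc =>
      (PySem.Int.bitCount (PySem.Int.band mc.1 mask_i)
        + PySem.Int.bitCount (PySem.Int.band mc.2 mask_o)) % 2 = 0) 0 0]
  set E : Int := (pairs.countP (fun mc => decide
      ((PySem.Int.bitCount (PySem.Int.band mc.1 mask_i)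
        + PySem.Int.bitCount (PySem.Int.band mc.2 mask_o)) % 2 = 0)) : Int) with hE
  set O : Int := (pairs.countP (fun mc => !decide
      ((PySem.Int.bitCount (PySem.Int.band mc.1 mask_i)
        + PySem.Int.bitCount (PySem.Int.band mc.2 mask_o)) % 2 = 0)) : Int) with hO
  have hzero : (0 : Int) + E = E := by ring
  have hzero' : (0 : Int) + O = O := by ring
  rw [hzero, hzero']
  rw [PySem.List.foldl_congr_mem _ _ (fun candidates k =>
      if candidates = [] ∨
          (if PySem.Int.bitCount (PySem.Int.band k (PySem.Int.bxor mask_i mask_o)) % 2 = 0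
           then E else O) = (candidates.headD (0, 0)).1 then
        candidates ++ [((if PySem.Int.bitCount (PySem.Int.band k (PySem.Int.bxor mask_i mask_o)) % 2 = 0
           then E else O), k)]
      else if (if PySem.Int.bitCount (PySem.Int.band k (PySem.Int.bxor mask_i mask_o)) % 2 = 0
           then E else O) > (candidates.headD (0, 0)).1 then
        [((if PySem.Int.bitCount (PySem.Int.band k (PySem.Int.bxor mask_i mask_o)) % 2 = 0
           then E else O), k)]
      else candidates) _
      (fun acc k hkmem => by
        have hk : (0 : Int) ≤ k := (PySem.List.mem_pyRange_one.mp hkmem).1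
        rw [pv_score pairs mask_i mask_o k hmi hmo hk])]
  exact pv_outer
    (fun k => if PySem.Int.bitCount (PySem.Int.band k (PySem.Int.bxor mask_i mask_o)) % 2 = 0
      then E else O)
    (by dsimp only; split <;> [rw [hE]; rw [hO]] <;> positivity)
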